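-- pv_equiv track=rewrite | github.com/crapas1974/algo2 | result/math/02_factorization.py | make_factor_sum
-- ===== SOURCE A (Python) =====
-- import math
--
-- def prime_numbers_fast(n):
--     if n < 2:
--         return []
--     sieve = [True] * (n + 1)
--     sieve[0] = False
--     sieve[1] = False
--     for i in range(2, int(n ** 0.5) + 1):
--         if sieve[i] == True:
--             for j in range(i + i, n + 1, i):
--                 sieve[j] = False
--     return [i for i in range(2, n + 1) if sieve[i] == True]
--
-- def factorization(n):
--     upper_bound = int(math.sqrt(n))
--     primes = prime_numbers_fast(upper_bound)
--     result = []
--     for prime in primes: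
--         while n % prime == 0:
--             result.append(prime)
--             n //= prime
--     if n != 1:
--         result.append(n)
--     return result
--
-- def make_factor_sum(start, end):
--     result = 0
--     for i in range(start, end + 1):
--         factors = factorization(i)
--         factors.sort()
--         before = -1
--         cnt = 0
--         sub_result = ''
--         for f in factors:
--             if before == f:
--                 cnt += 1
--             else:
--                 if before != -1:
--                     sub_result += str(before) + str(cnt)
--                 before = f
--                 cnt = 1
--         sub_result += str(before) + str(cnt)
--         result += int(sub_result)
--     return result
-- ===== SOURCE B (Python) =====
-- def make_factor_sum(start, end):
--     total = 0
--     for i in range(start, end + 1):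
--         n = i
--         d = 2
--         s = ''
--         while d * d <= n:
--             if n % d == 0:
--                 c = 0
--                 while n % d == 0:
--                     c += 1
--                     n //= d
--                 s += str(d) + str(c)
--             d += 1
--         if n > 1:
--             s += str(n) + '1'
--         total += int(s)
--     return total
-- ===== Notes on version B (the rewrite author's own statement) =====
-- stated objective: simpler
-- what changed: B replaces A's per-number pipeline (build a fresh prime sieve up to isqrt(i), trial-divide by the prime list, sort, then run-length-encode with a sentinel) by direct trial division by every d starting at 2 with a shrinking bound d*d<=n, counting each exponent inline while building the encoded string.
-- outside the precondition, e.g. on make_factor_sum(0, 0): A returns 1, B raises ValueError; on make_factor_sum(1, 1): A returns -10, B raises ValueError; on make_factor_sum(0, 1): A returns -9, B raises ValueError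
import Mathlib
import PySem

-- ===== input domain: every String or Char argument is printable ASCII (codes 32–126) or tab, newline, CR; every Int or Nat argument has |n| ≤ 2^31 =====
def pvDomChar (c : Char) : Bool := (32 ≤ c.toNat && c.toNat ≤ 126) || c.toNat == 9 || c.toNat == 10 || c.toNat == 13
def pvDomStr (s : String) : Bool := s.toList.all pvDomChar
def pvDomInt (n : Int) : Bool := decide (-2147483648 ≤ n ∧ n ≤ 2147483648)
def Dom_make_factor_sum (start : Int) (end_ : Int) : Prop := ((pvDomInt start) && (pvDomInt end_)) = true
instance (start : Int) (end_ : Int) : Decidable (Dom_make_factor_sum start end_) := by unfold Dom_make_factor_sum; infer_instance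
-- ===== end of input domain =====

-- B replaces A's per-number sieve+sort+run-length-encode pipeline by direct trial division with a
-- shrinking bound, counting exponents inline (simpler: no sieve, no sort, no separate RLE pass).

-- ===== PORT A =====
-- Python: prime_numbers_fast(n).  'int(n ** 0.5)' is ported as Nat.sqrt, exact on the admitted
-- domain (0 ≤ n ≤ 2^31, far below the first float/isqrt disagreement).
def prime_numbers_fast (n : Int) : List Int :=
  if n < 2 then []
  else
    let sieve0 := ((Array.replicate (n.toNat + 1) true).setIfInBounds 0 false).setIfInBounds 1 false
    let sieve := (PySem.List.pyRange 2 ((n.toNat.sqrt : Int) + 1) 1).foldl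
      (fun sv i =>
        if sv.getD i.toNat false then
          (PySem.List.pyRange (i + i) (n + 1) i).foldl (fun sv2 j => sv2.setIfInBounds j.toNat false) sv
        else sv) sieve0
    (PySem.List.pyRange 2 (n + 1) 1).filter (fun i => sieve.getD i.toNat false)

-- 'while n % prime == 0: result.append(prime); n //= prime', fuel = n.toNat (enough: inside Pre_
-- the residual is positive and the divisor ≥ 2, so the loop runs < n times)
def divOut (fuel : Nat) (p : Int) (st : List Int × Int) : List Int × Int :=
  match fuel with
  | 0 => st
  | fuel + 1 =>
    if PySem.Int.mod st.2 p == 0 then divOut fuel p (st.1 ++ [p], PySem.Int.floordiv st.2 p)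
    else st

-- Python: factorization(n).  'int(math.sqrt(n))' ported as Nat.sqrt (exact on the admitted domain;
-- Pre_ keeps n ≥ 2, where math.sqrt does not raise).
def pyFactorization (n : Int) : List Int :=
  let upper_bound : Int := (n.toNat.sqrt : Int)
  let primes := prime_numbers_fast upper_bound
  let st := primes.foldl (fun st prime => divOut st.2.toNat prime st) ([], n)
  if st.2 != 1 then st.1 ++ [st.2] else st.1

-- the body of A's run-length-encoding loop, state = (before, cnt, sub_result)
def rleStep (st : Int × Int × String) (f : Int) : Int × Int × String :=
  if st.1 == f then (st.1, st.2.1 + 1, st.2.2)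
  else if st.1 != -1 then (f, 1, st.2.2 ++ PySem.Int.toStr st.1 ++ PySem.Int.toStr st.2.1)
  else (f, 1, st.2.2)

-- Python: make_factor_sum(start, end).  'int(sub_result)' is PySem.Int.ofStr?; inside Pre_ the
-- string is always a nonempty digit string, so the .getD 0 default is never taken.
-- the loop body: sort, run-length-encode, concatenate (one iteration of A's outer loop)
def aSubResult (i : Int) : String :=
  let factors := PySem.List.sorted (pyFactorization i) (fun x => x) false
  let st := factors.foldl rleStep (-1, 0, "")
  st.2.2 ++ PySem.Int.toStr st.1 ++ PySem.Int.toStr st.2.1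

def make_factor_sum (start : Int) (end_ : Int) : Int :=
  (PySem.List.pyRange start (end_ + 1) 1).foldl
    (fun result i => result + (PySem.Int.ofStr? (aSubResult i)).getD 0) 0

-- ===== PORT B =====
-- 'c = 0; while n % d == 0: c += 1; n //= d', state = (c, n), fuel = n.toNat (enough inside Pre_)
def bInner (fuel : Nat) (d : Int) (st : Int × Int) : Int × Int :=
  match fuel with
  | 0 => st
  | fuel + 1 =>
    if PySem.Int.mod st.2 d == 0 then bInner fuel d (st.1 + 1, PySem.Int.floordiv st.2 d)
    else st

-- 'while d * d <= n: …; d += 1', returns (n, s); fuel = n.toNat + 2 (enough: d only grows)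
def bOuter (fuel : Nat) (d : Int) (n : Int) (s : String) : Int × String :=
  match fuel with
  | 0 => (n, s)
  | fuel + 1 =>
    if d * d ≤ n then
      if PySem.Int.mod n d == 0 then
        let cn := bInner n.toNat d (0, n)
        bOuter fuel (d + 1) cn.2 (s ++ PySem.Int.toStr d ++ PySem.Int.toStr cn.1)
      else bOuter fuel (d + 1) n s
    else (n, s)

-- the loop body of B: trial-divide and append the encoded chunks (one iteration)
def bSubResult (i : Int) : String :=
  let rs := bOuter (i.toNat + 2) 2 i ""
  if rs.1 > 1 then rs.2 ++ PySem.Int.toStr rs.1 ++ "1" else rs.2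

def make_factor_sum_alt (start : Int) (end_ : Int) : Int :=
  (PySem.List.pyRange start (end_ + 1) 1).foldl
    (fun total i => total + (PySem.Int.ofStr? (bSubResult i)).getD 0) 0

-- ===== PRECONDITION & SPEC =====
-- Pre_ excludes nonempty ranges that start below 2: on negative i Python A raises ValueError
-- (math.sqrt of a negative number), and on i ∈ {0, 1} A returns accidental sentinel artefacts
-- (int('01') = 1 for 0, and -10 from the leftover 'before = -1' for 1) that B cannot produce —
-- B itself raises ValueError (int('')) on every such i.
def Pre_make_factor_sum (start : Int) (end_ : Int) : Prop := end_ < start ∨ 2 ≤ start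
instance (start : Int) (end_ : Int) : Decidable (Pre_make_factor_sum start end_) := by
  unfold Pre_make_factor_sum; infer_instance
def pvWitness_make_factor_sum : Int × Int := (2, 12)

def Spec_make_factor_sum (start : Int) (end_ : Int) (out : Int) : Prop := out = make_factor_sum_alt start end_
instance (start : Int) (end_ : Int) (out : Int) : Decidable (Spec_make_factor_sum start end_ out) := by unfold Spec_make_factor_sum; infer_instance

-- ===== CLAIM (what is proved, stated in full; the proofs are below) =====
def Claim_equal_make_factor_sum : Prop := ∀ (start : Int) (end_ : Int), Dom_make_factor_sum start end_ → Pre_make_factor_sum start end_ → Spec_make_factor_sum start end_ (make_factor_sum start end_)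

-- ===== LEMMAS AND PROOFS =====

-- the run-length encoding of a pyFactorization, as (prime, multiplicity) pairs
def encodePairs : List (Int × Int) → String
  | [] => ""
  | (p, c) :: t => PySem.Int.toStr p ++ PySem.Int.toStr c ++ encodePairs t

def flattenPairs (Q : List (Int × Int)) : List Int :=
  Q.flatMap (fun pc => List.replicate pc.2.toNat pc.1)

def finalizeRLE (st : Int × Int × String) : String :=
  st.2.2 ++ PySem.Int.toStr st.1 ++ PySem.Int.toStr st.2.1

-- ---- generic fold invariant ----
theorem foldl_preserve {α β : Type} (P : α → Prop) (f : α → β → α) (l : List β) (a : α)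
    (hstep : ∀ a x, x ∈ l → P a → P (f a x)) (h0 : P a) : P (l.foldl f a) := by
  induction l generalizing a with
  | nil => exact h0
  | cons x t ih =>
      exact ih _ (fun a y hy => hstep a y (List.mem_cons_of_mem _ hy)) (hstep a x List.mem_cons_self h0)

-- ---- encode / flatten basics ----
theorem encodePairs_append (Q R : List (Int × Int)) :
    encodePairs (Q ++ R) = encodePairs Q ++ encodePairs R := by
  induction Q with
  | nil => simp [encodePairs]
  | cons pc t ih => cases pc; simp [encodePairs, ih, String.append_assoc]

theorem flattenPairs_cons (pc : Int × Int) (Q : List (Int × Int)) :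
    flattenPairs (pc :: Q) = List.replicate pc.2.toNat pc.1 ++ flattenPairs Q := by
  simp [flattenPairs]

theorem mem_flattenPairs {x : Int} {Q : List (Int × Int)} (h : x ∈ flattenPairs Q) :
    ∃ pc ∈ Q, x = pc.1 := by
  simp only [flattenPairs, List.mem_flatMap] at h
  obtain ⟨pc, hpc, hx⟩ := h
  exact ⟨pc, hpc, (List.eq_of_mem_replicate hx)⟩

theorem flattenPairs_pairwise_le (Q : List (Int × Int))
    (hk : Q.Pairwise (fun a b => a.1 < b.1)) : (flattenPairs Q).Pairwise (· ≤ ·) := by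
  induction Q with
  | nil => simp [flattenPairs]
  | cons pc t ih =>
      rw [flattenPairs_cons]
      rw [List.pairwise_append]
      refine ⟨?_, ih hk.tail, ?_⟩
      · rw [List.pairwise_replicate]; right; exact le_refl _
      · intro a ha b hb
        have ha' : a = pc.1 := List.eq_of_mem_replicate ha
        obtain ⟨qc, hqc, rfl⟩ := mem_flattenPairs hb
        have := (List.pairwise_cons.mp hk).1 qc hqc
        omega

-- ---- A's run-length-encoding loop on a grouped list ----
theorem rle_replicate (k : Nat) (p c : Int) (s : String) :
    (List.replicate k p).foldl rleStep (p, c, s) = (p, c + (k : Int), s) := by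
  induction k generalizing c with
  | zero => simp
  | succ k ih =>
      rw [List.replicate_succ, List.foldl_cons]
      have hstep : rleStep (p, c, s) p = (p, c + 1, s) := by simp [rleStep]
      rw [hstep, ih]
      have : c + 1 + (k : Int) = c + ((k + 1 : Nat) : Int) := by push_cast; ring
      rw [this]

theorem rle_main (Q : List (Int × Int)) (p c : Int) (s : String) (h0 : 0 ≤ p)
    (hQ : ∀ pc ∈ Q, p < pc.1 ∧ 1 ≤ pc.2) (hP : Q.Pairwise (fun a b => a.1 < b.1)) :
    finalizeRLE ((flattenPairs Q).foldl rleStep (p, c, s)) =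
      s ++ PySem.Int.toStr p ++ PySem.Int.toStr c ++ encodePairs Q := by
  induction Q generalizing p c s with
  | nil => simp [flattenPairs, finalizeRLE, encodePairs, String.append_assoc]
  | cons pc T ih =>
      obtain ⟨q, k⟩ := pc
      have hpq : p < q := by simpa using (hQ (q, k) List.mem_cons_self).1
      have hk1 : 1 ≤ k := by simpa using (hQ (q, k) List.mem_cons_self).2
      have hlist : flattenPairs ((q, k) :: T) =
          q :: (List.replicate (k.toNat - 1) q ++ flattenPairs T) := by
        rw [flattenPairs_cons]
        simp only
        rw [show k.toNat = (k.toNat - 1) + 1 by omega, List.replicate_succ]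
        simp
      rw [hlist, List.foldl_cons]
      have h1 : (p == q) = false := by simp; omega
      have h2 : (p != -1) = true := by simp; omega
      have hstep : rleStep (p, c, s) q = (q, 1, s ++ PySem.Int.toStr p ++ PySem.Int.toStr c) := by
        simp [rleStep, h1, h2]
      rw [hstep, List.foldl_append, rle_replicate]
      have harith : (1 : Int) + ((k.toNat - 1 : Nat) : Int) = k := by omega
      rw [harith]
      rw [ih q k _ (by omega)
        (fun pc hpc => ⟨(List.pairwise_cons.mp hP).1 pc hpc, (hQ pc (List.mem_cons_of_mem _ hpc)).2⟩)
        (List.pairwise_cons.mp hP).2]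
      simp [encodePairs, String.append_assoc]

theorem rle_entry (Q : List (Int × Int)) (hne : Q ≠ [])
    (hk : ∀ pc ∈ Q, 2 ≤ pc.1 ∧ 1 ≤ pc.2) (hP : Q.Pairwise (fun a b => a.1 < b.1)) :
    finalizeRLE ((flattenPairs Q).foldl rleStep (-1, 0, "")) = encodePairs Q := by
  cases Q with
  | nil => exact absurd rfl hne
  | cons pc T =>
      obtain ⟨q, k⟩ := pc
      have hq2 : 2 ≤ q := by simpa using (hk (q, k) List.mem_cons_self).1
      have hk1 : 1 ≤ k := by simpa using (hk (q, k) List.mem_cons_self).2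
      have hlist : flattenPairs ((q, k) :: T) =
          q :: (List.replicate (k.toNat - 1) q ++ flattenPairs T) := by
        rw [flattenPairs_cons]
        simp only
        rw [show k.toNat = (k.toNat - 1) + 1 by omega, List.replicate_succ]
        simp
      rw [hlist, List.foldl_cons]
      have h1 : ((-1 : Int) == q) = false := by simp; omega
      have hstep : rleStep (-1, 0, "") q = (q, 1, "") := by simp [rleStep, h1]
      rw [hstep, List.foldl_append, rle_replicate]
      rw [show (1 : Int) + ((k.toNat - 1 : Nat) : Int) = k by omega]
      rw [rle_main T q k "" (by omega)
        (fun pc hpc => ⟨(List.pairwise_cons.mp hP).1 pc hpc, (hk pc (List.mem_cons_of_mem _ hpc)).2⟩)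
        (List.pairwise_cons.mp hP).2]
      simp [encodePairs, String.append_assoc]

-- ---- Int / Nat transfer and the canonical factor list ----
theorem map_toNat_prod (L : List Int) (h : ∀ x ∈ L, 0 ≤ x) :
    ((L.map Int.toNat).prod : Int) = L.prod := by
  induction L with
  | nil => simp
  | cons x t ih =>
      simp only [List.map_cons, List.prod_cons, Nat.cast_mul]
      rw [Int.toNat_of_nonneg (h x (by simp)), ih (fun y hy => h y (List.mem_cons_of_mem _ hy))]

theorem map_cast_toNat (L : List Int) (h : ∀ x ∈ L, 0 ≤ x) :
    (L.map Int.toNat).map (fun q : Nat => (q : Int)) = L := by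
  induction L with
  | nil => simp
  | cons x t ih =>
      simp only [List.map_cons]
      rw [Int.toNat_of_nonneg (h x (by simp)), ih (fun y hy => h y (List.mem_cons_of_mem _ hy))]

-- a sorted list of primes with product N is THE prime factor list of N
theorem pivot_eq_primeFactorsList (L : List Int) (N : Nat)
    (hprod : L.prod = (N : Int)) (hpr : ∀ x ∈ L, 2 ≤ x ∧ x.toNat.Prime)
    (hsort : L.Pairwise (· ≤ ·)) :
    L = (N.primeFactorsList).map (fun q : Nat => (q : Int)) := by
  have h0 : ∀ x ∈ L, 0 ≤ x := fun x hx => by have := (hpr x hx).1; omega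
  have hprodN : (L.map Int.toNat).prod = N := by
    have := map_toNat_prod L h0
    rw [hprod] at this
    exact_mod_cast this
  have hperm : (L.map Int.toNat).Perm N.primeFactorsList := by
    refine Nat.primeFactorsList_unique hprodN ?_
    intro p hp
    obtain ⟨x, hx, rfl⟩ := List.mem_map.mp hp
    exact (hpr x hx).2
  have hsortN : (L.map Int.toNat).Pairwise (· ≤ ·) := by
    rw [List.pairwise_map]
    refine List.Pairwise.imp_of_mem ?_ hsort
    intro a b ha hb hab
    have := h0 a ha
    have := h0 b hb
    omega
  have heq : L.map Int.toNat = N.primeFactorsList :=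
    List.Perm.eq_of_pairwise (fun a b _ _ h1 h2 => le_antisymm h1 h2) hsortN
      (Nat.primeFactorsList_sorted N).pairwise hperm
  rw [← map_cast_toNat L h0, heq]

-- ---- B's inner loop ----
theorem bInner_spec (fuel : Nat) (d : Int) : ∀ (n c : Int), 2 ≤ d → 1 ≤ n → n < d ^ fuel →
    ∃ (k : Nat) (m : Int), bInner fuel d (c, n) = (c + (k : Int), m) ∧
      n = d ^ k * m ∧ ¬ (d ∣ m) ∧ 1 ≤ m := by
  induction fuel with
  | zero =>
      intro n c hd hn hfuel
      rw [pow_zero] at hfuel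
      omega
  | succ fuel ih =>
      intro n c hd hn hfuel
      by_cases hdvd : d ∣ n
      · have hmod : PySem.Int.mod n d = 0 := (PySem.Int.mod_eq_zero_iff_dvd n d).mpr hdvd
        obtain ⟨t, rfl⟩ := hdvd
        have ht1 : 1 ≤ t := by nlinarith
        have hdiv : PySem.Int.floordiv (d * t) d = t := by
          rw [PySem.Int.floordiv_eq_ediv_of_pos (by omega)]
          exact Int.mul_ediv_cancel_left t (by omega)
        have ht : t < d ^ fuel := by
          rw [pow_succ'] at hfuel
          exact lt_of_mul_lt_mul_left hfuel (by omega)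
        obtain ⟨k, m, hres, heq, hnd, hm⟩ := ih t (c + 1) hd ht1 ht
        refine ⟨k + 1, m, ?_, ?_, hnd, hm⟩
        · show bInner (fuel + 1) d (c, d * t) = _
          simp only [bInner, hmod]
          simp only [BEq.rfl, if_true, hdiv]
          have hc : c + 1 + (k : Int) = c + ((k + 1 : Nat) : Int) := by push_cast; ring
          rw [hres, hc]
        · rw [heq, pow_succ']
          ring
      · have hmod : (PySem.Int.mod n d == 0) = false := by
          simp [PySem.Int.mod_eq_zero_iff_dvd, hdvd]
        refine ⟨0, n, ?_, by simp, hdvd, hn⟩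
        show bInner (fuel + 1) d (c, n) = _
        simp [bInner, hmod]

-- ---- primality from the absence of small divisors ----
theorem prime_of_no_small_divisor (x n : Int) (h2 : 2 ≤ x) (hdvd : x ∣ n)
    (hinv : ∀ e : Int, 2 ≤ e → e < x → ¬ (e ∣ n)) : x.toNat.Prime := by
  by_contra hnp
  have hq := Nat.minFac_prime (show x.toNat ≠ 1 by omega)
  have hne : x.toNat.minFac ≠ x.toNat := fun h => hnp (h ▸ hq)
  have hle : x.toNat.minFac ≤ x.toNat := Nat.minFac_le (by omega)
  have hdx : (x.toNat.minFac : Int) ∣ x := by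
    have := Int.natCast_dvd_natCast.mpr (Nat.minFac_dvd x.toNat)
    rwa [Int.toNat_of_nonneg (by omega : (0:Int) ≤ x)] at this
  exact hinv (x.toNat.minFac : Int) (by exact_mod_cast hq.two_le) (by omega)
    (dvd_trans hdx hdvd)

-- a residual below d*d with no divisor below d is prime
theorem stop_prime (d n : Int) (h2 : 2 ≤ d) (hn : 2 ≤ n) (hstop : n < d * d)
    (hinv : ∀ e : Int, 2 ≤ e → e < d → ¬ (e ∣ n)) : n.toNat.Prime := by
  by_contra hnp
  have hq := Nat.minFac_prime (show n.toNat ≠ 1 by omega)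
  have hsq := Nat.minFac_sq_le_self (show 0 < n.toNat by omega) hnp
  have hdn : n.toNat < d.toNat * d.toNat := by
    have h1 : ((n.toNat : Int)) < ((d.toNat : Int)) * ((d.toNat : Int)) := by
      rw [Int.toNat_of_nonneg (by omega : (0:Int) ≤ n), Int.toNat_of_nonneg (by omega : (0:Int) ≤ d)]
      exact hstop
    exact_mod_cast h1
  have hqd : n.toNat.minFac < d.toNat := by
    by_contra hge
    rw [not_lt] at hge
    have := Nat.mul_le_mul hge hge
    nlinarith [hsq, sq (n.toNat.minFac)]
  have hdvd : (n.toNat.minFac : Int) ∣ n := by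
    have := Int.natCast_dvd_natCast.mpr (Nat.minFac_dvd n.toNat)
    rwa [Int.toNat_of_nonneg (by omega : (0:Int) ≤ n)] at this
  exact hinv (n.toNat.minFac : Int) (by exact_mod_cast hq.two_le) (by omega) hdvd

-- ---- B's outer loop ----
theorem bOuter_spec (fuel : Nat) : ∀ (d n : Int) (s : String), 2 ≤ d → 1 ≤ n →
    (∀ e : Int, 2 ≤ e → e < d → ¬ (e ∣ n)) → n.toNat + 2 ≤ d.toNat + fuel →
    ∃ (Q : List (Int × Int)) (r : Int),
      bOuter fuel d n s = (r, s ++ encodePairs Q) ∧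
      1 ≤ r ∧ (1 < r → d ≤ r ∧ r.toNat.Prime) ∧
      Q.Pairwise (fun a b => a.1 < b.1) ∧
      (∀ pc ∈ Q, d ≤ pc.1 ∧ (1 < r → pc.1 < r) ∧ 1 ≤ pc.2 ∧ pc.1.toNat.Prime) ∧
      (flattenPairs Q).prod * r = n := by
  induction fuel with
  | zero =>
      intro d n s h2 hn hinv hfuel
      have hstop : ¬ (d * d ≤ n) := by
        intro hdd
        have hdn : d ≤ n := by nlinarith
        omega
      refine ⟨[], n, ?_, hn, ?_, by simp, by simp, by simp [flattenPairs]⟩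
      · simp [bOuter, encodePairs]
      · intro h1n
        refine ⟨?_, stop_prime d n h2 (by omega) (not_le.mp hstop) hinv⟩
        by_contra hdn
        rw [not_le] at hdn
        exact hinv n (by omega) hdn (dvd_refl n)
  | succ fuel ih =>
      intro d n s h2 hn hinv hfuel
      by_cases hdd : d * d ≤ n
      · by_cases hdvd : d ∣ n
        · -- d divides n: run the inner loop, recurse on the reduced residual
          have hpow : n < d ^ n.toNat := by
            have h1 : n.toNat < 2 ^ n.toNat := Nat.lt_two_pow_self
            have h2' : (2:Int) ^ n.toNat ≤ d ^ n.toNat := by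
              gcongr
            have : (n.toNat : Int) < (2:Int) ^ n.toNat := by exact_mod_cast h1
            rw [Int.toNat_of_nonneg (by omega : (0:Int) ≤ n)] at this
            omega
          obtain ⟨k, m, hres, heq, hnd, hm⟩ := bInner_spec n.toNat d n 0 h2 hn hpow
          have hk1 : 1 ≤ k := by
            rcases Nat.eq_zero_or_pos k with hk0 | hk; · subst hk0; simp at heq; subst heq; exact absurd hdvd hnd
            exact hk
          have hmod : PySem.Int.mod n d = 0 := (PySem.Int.mod_eq_zero_iff_dvd n d).mpr hdvd
          have hmdvd : m ∣ n := ⟨d ^ k, by rw [heq]; ring⟩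
          have hmn : m ≤ n := Int.le_of_dvd (by omega) hmdvd
          obtain ⟨Q', r, hrec, hr1, hrp, hQp, hQm, hQprod⟩ := ih (d + 1) m
            (s ++ PySem.Int.toStr d ++ PySem.Int.toStr ((k : Int)))
            (by omega) hm
            (by
              intro e he2 hed hedvd
              rcases lt_or_ge e d with helt | hege
              · exact hinv e he2 helt (dvd_trans hedvd hmdvd)
              · have : e = d := by omega
                subst this
                exact hnd hedvd)
            (by omega)
          refine ⟨(d, (k : Int)) :: Q', r, ?_, hr1, fun h => ⟨by have := (hrp h).1; omega, (hrp h).2⟩,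
            ?_, ?_, ?_⟩
          · show bOuter (fuel + 1) d n s = _
            simp only [bOuter, if_pos hdd, hmod, BEq.rfl, if_true, hres]
            simp only [zero_add]
            rw [hrec]
            rw [encodePairs]
            simp [String.append_assoc]
          · rw [List.pairwise_cons]
            exact ⟨fun pc hpc => by have := (hQm pc hpc).1; simp; omega, hQp⟩
          · intro pc hpc
            rcases List.mem_cons.mp hpc with rfl | hpc'
            · refine ⟨le_refl _, fun h => by have := (hrp h).1; simp; omega, by simp; omega,
                prime_of_no_small_divisor d n h2 hdvd hinv⟩
            · obtain ⟨ha, hb, hc, hd'⟩ := hQm pc hpc'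
              exact ⟨by omega, fun h => hb h, hc, hd'⟩
          · rw [flattenPairs_cons]
            simp only [List.prod_append, List.prod_replicate]
            have hkk : ((k : Int)).toNat = k := by simp
            rw [hkk]
            rw [heq]
            ring_nf
            nlinarith [hQprod]
        · -- d does not divide n: step to d + 1
          have hmod : (PySem.Int.mod n d == 0) = false := by
            simp [PySem.Int.mod_eq_zero_iff_dvd, hdvd]
          obtain ⟨Q, r, hrec, hr1, hrp, hQp, hQm, hQprod⟩ := ih (d + 1) n s (by omega) hn
            (by
              intro e he2 hed hedvd
              rcases lt_or_ge e d with helt | hege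
              · exact hinv e he2 helt hedvd
              · have : e = d := by omega
                subst this
                exact hdvd hedvd)
            (by omega)
          refine ⟨Q, r, ?_, hr1, fun h => ⟨by have := (hrp h).1; omega, (hrp h).2⟩, hQp, ?_, hQprod⟩
          · show bOuter (fuel + 1) d n s = _
            simp only [bOuter, if_pos hdd, hmod, Bool.false_eq_true, if_false]
            exact hrec
          · intro pc hpc
            obtain ⟨ha, hb, hc, hd'⟩ := hQm pc hpc
            exact ⟨by omega, hb, hc, hd'⟩
      · -- d*d > n: the loop stops; the residual is 1 or a prime
        refine ⟨[], n, ?_, hn, ?_, by simp, by simp, by simp [flattenPairs]⟩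
        · show bOuter (fuel + 1) d n s = _
          simp [bOuter, if_neg hdd, encodePairs]
        · intro h1n
          refine ⟨?_, stop_prime d n h2 (by omega) (not_le.mp hdd) hinv⟩
          by_contra hdn
          rw [not_le] at hdn
          exact hinv n (by omega) hdn (dvd_refl n)

-- ---- A's divide-out loop ----
theorem divOut_spec (fuel : Nat) (p : Int) : ∀ (n : Int) (acc : List Int), 2 ≤ p → 1 ≤ n →
    n < p ^ fuel →
    ∃ (k : Nat) (m : Int), divOut fuel p (acc, n) = (acc ++ List.replicate k p, m) ∧
      n = p ^ k * m ∧ ¬ (p ∣ m) ∧ 1 ≤ m := by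
  induction fuel with
  | zero =>
      intro n acc hp hn hfuel
      rw [pow_zero] at hfuel
      omega
  | succ fuel ih =>
      intro n acc hp hn hfuel
      by_cases hdvd : p ∣ n
      · have hmod : PySem.Int.mod n p = 0 := (PySem.Int.mod_eq_zero_iff_dvd n p).mpr hdvd
        obtain ⟨t, rfl⟩ := hdvd
        have ht1 : 1 ≤ t := by nlinarith
        have hdiv : PySem.Int.floordiv (p * t) p = t := by
          rw [PySem.Int.floordiv_eq_ediv_of_pos (by omega)]
          exact Int.mul_ediv_cancel_left t (by omega)
        have ht : t < p ^ fuel := by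
          rw [pow_succ'] at hfuel
          exact lt_of_mul_lt_mul_left hfuel (by omega)
        obtain ⟨k, m, hres, heq, hnd, hm⟩ := ih t (acc ++ [p]) hp ht1 ht
        refine ⟨k + 1, m, ?_, ?_, hnd, hm⟩
        · show divOut (fuel + 1) p (acc, p * t) = _
          simp only [divOut, hmod]
          simp only [BEq.rfl, if_true, hdiv]
          rw [hres]
          rw [List.append_assoc]
          rw [show [p] ++ List.replicate k p = List.replicate (k + 1) p from (List.replicate_succ).symm]
        · rw [heq, pow_succ']
          ring
      · have hmod : (PySem.Int.mod n p == 0) = false := by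
          simp [PySem.Int.mod_eq_zero_iff_dvd, hdvd]
        refine ⟨0, n, ?_, by simp, hdvd, hn⟩
        show divOut (fuel + 1) p (acc, n) = _
        simp [divOut, hmod]

-- fuel bound used for the divide-out loops
theorem lt_pow_self_toNat (p n : Int) (hp : 2 ≤ p) (hn : 1 ≤ n) : n < p ^ n.toNat := by
  have h1 : n.toNat < 2 ^ n.toNat := Nat.lt_two_pow_self
  have h2 : (2:Int) ^ n.toNat ≤ p ^ n.toNat := by gcongr
  have h3 : (n.toNat : Int) < (2:Int) ^ n.toNat := by exact_mod_cast h1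
  rw [Int.toNat_of_nonneg (by omega : (0:Int) ≤ n)] at h3
  omega

theorem array_getD_lt {a : Array Bool} {r : Nat} (h : r < a.size) : a.getD r false = a[r] := by
  simp [Array.getD, h]

-- ---- the sieve: every prime q ≤ m survives ----
theorem primes_complete (m : Int) (q : Nat) (hq : q.Prime) (hle : (q : Int) ≤ m) :
    (q : Int) ∈ prime_numbers_fast m := by
  have hq2 := hq.two_le
  have hm2 : ¬ (m < 2) := by omega
  simp only [prime_numbers_fast, if_neg hm2]
  rw [List.mem_filter]
  constructor
  · rw [PySem.List.mem_pyRange_one]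
    constructor
    · exact_mod_cast hq2
    · omega
  · -- the sieve never marks a prime index
    have key : ∀ (a : Array Bool), a.size = m.toNat + 1 ∧
        (∀ r : Nat, r.Prime → r < a.size → a.getD r false = true) →
        ∀ (l : List Int), (∀ i ∈ l, 2 ≤ i) →
        (l.foldl (fun sv i =>
          if sv.getD i.toNat false then
            (PySem.List.pyRange (i + i) (m + 1) i).foldl
              (fun sv2 j => sv2.setIfInBounds j.toNat false) sv
          else sv) a).size = m.toNat + 1 ∧
        (∀ r : Nat, r.Prime → r < (l.foldl (fun sv i =>
          if sv.getD i.toNat false then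
            (PySem.List.pyRange (i + i) (m + 1) i).foldl
              (fun sv2 j => sv2.setIfInBounds j.toNat false) sv
          else sv) a).size →
          (l.foldl (fun sv i =>
            if sv.getD i.toNat false then
              (PySem.List.pyRange (i + i) (m + 1) i).foldl
                (fun sv2 j => sv2.setIfInBounds j.toNat false) sv
            else sv) a).getD r false = true) := by
      intro a ha l hl
      refine foldl_preserve (fun a => a.size = m.toNat + 1 ∧
        ∀ r : Nat, r.Prime → r < a.size → a.getD r false = true) _ l a ?_ ha
      intro a2 i hi ha2
      by_cases hcond : a2.getD i.toNat false
      · rw [if_pos hcond]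
        have hi2 : 2 ≤ i := hl i hi
        refine foldl_preserve (fun a => a.size = m.toNat + 1 ∧
          ∀ r : Nat, r.Prime → r < a.size → a.getD r false = true) _ _ a2 ?_ ha2
        intro a3 j hj ha3
        obtain ⟨hj1, hj2, hj3⟩ := (PySem.List.mem_pyRange_iff_of_pos (by omega) j).mp hj
        have hjdvd : i ∣ j := by
          have h1 : i ∣ j - (i + i) := hj3
          have h2 : i ∣ (i + i) := ⟨2, by ring⟩
          have := dvd_add h1 h2
          simpa using this
        obtain ⟨t, ht⟩ := hjdvd
        have ht2 : 2 ≤ t := by nlinarith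
        constructor
        · rw [Array.size_setIfInBounds]; exact ha3.1
        · intro r hr hrlt
          rw [Array.size_setIfInBounds] at hrlt
          have hrne : j.toNat ≠ r := by
            intro hEq
            have hjr : j = (r : Int) := by omega
            have hidvd : i.toNat ∣ r := by
              have h1 : (i.toNat : Int) ∣ (r : Int) := by
                rw [Int.toNat_of_nonneg (by omega : (0:Int) ≤ i), ← hjr, ht]
                exact ⟨t, rfl⟩
              exact_mod_cast h1
            rcases (hr.eq_one_or_self_of_dvd i.toNat hidvd) with h1 | h1
            · omega
            · have : (r : Int) = i * t := by rw [← hjr, ht]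
              have : i < (r : Int) := by nlinarith
              omega
          rw [array_getD_lt (show r < (a3.setIfInBounds j.toNat false).size by
            rw [Array.size_setIfInBounds]; exact hrlt)]
          rw [Array.getElem_setIfInBounds, if_neg hrne]
          have := ha3.2 r hr hrlt
          rwa [array_getD_lt hrlt] at this
      · rw [if_neg hcond]; exact ha2
    have hinit : (((Array.replicate (m.toNat + 1) true).setIfInBounds 0 false).setIfInBounds 1 false).size = m.toNat + 1 ∧
        ∀ r : Nat, r.Prime → r < (((Array.replicate (m.toNat + 1) true).setIfInBounds 0 false).setIfInBounds 1 false).size →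
          (((Array.replicate (m.toNat + 1) true).setIfInBounds 0 false).setIfInBounds 1 false).getD r false = true := by
      constructor
      · rw [Array.size_setIfInBounds, Array.size_setIfInBounds, Array.size_replicate]
      · intro r hr hrlt
        simp only [Array.size_setIfInBounds, Array.size_replicate] at hrlt
        have hr2 := hr.two_le
        rw [array_getD_lt (by simpa using hrlt)]
        rw [Array.getElem_setIfInBounds, Array.getElem_setIfInBounds]
        rw [if_neg (by omega), if_neg (by omega)]
        · apply Array.getElem_replicate
        · rw [Array.size_replicate]; exact hrlt
        · rw [Array.size_setIfInBounds, Array.size_replicate]; exact hrlt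
    have hfin := key _ hinit (PySem.List.pyRange 2 ((m.toNat.sqrt : Int) + 1) 1)
      (fun i hi => (PySem.List.mem_pyRange_one.mp hi).1)
    have hsz := hfin.1
    have := hfin.2 q hq (by omega)
    simpa using this

theorem primes_bounds (m : Int) : ∀ p ∈ prime_numbers_fast m, 2 ≤ p ∧ p ≤ m := by
  intro p hp
  by_cases hm : m < 2
  · simp [prime_numbers_fast, hm] at hp
  · simp only [prime_numbers_fast, if_neg hm] at hp
    have h1 := (List.mem_filter.mp hp).1
    have := PySem.List.mem_pyRange_one.mp h1
    omega

theorem primes_sorted (m : Int) : (prime_numbers_fast m).Pairwise (· < ·) := by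
  by_cases hm : m < 2
  · simp [prime_numbers_fast, hm]
  · simp only [prime_numbers_fast, if_neg hm]
    exact List.Pairwise.filter _ (PySem.List.pairwise_lt_pyRange_one _ _)

-- ---- A's fold over the prime list ----
theorem factor_fold_spec (m : Int) : ∀ (todo : List Int) (acc : List Int) (r : Int),
    1 ≤ r → (∀ p ∈ todo, 2 ≤ p ∧ p ≤ m) → todo.Pairwise (· < ·) →
    (∀ q : Nat, q.Prime → (q : Int) ∣ r → (q : Int) ≤ m → (q : Int) ∈ todo) →
    ∃ (ext : List Int) (rf : Int),
      todo.foldl (fun st prime => divOut st.2.toNat prime st) (acc, r) = (acc ++ ext, rf) ∧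
      1 ≤ rf ∧ rf ∣ r ∧ ext.prod * rf = r ∧
      (∀ x ∈ ext, 2 ≤ x ∧ x.toNat.Prime) ∧
      (∀ q : Nat, q.Prime → (q : Int) ∣ rf → ¬ ((q : Int) ≤ m)) := by
  intro todo
  induction todo with
  | nil =>
      intro acc r hr hbnd hpw hmem
      refine ⟨[], r, by simp, hr, dvd_refl r, by simp, by simp, ?_⟩
      intro q' hqp hqd hqle
      simpa using hmem q' hqp hqd hqle
  | cons p T ih =>
      intro acc r hr hbnd hpw hmem
      have hp2 : 2 ≤ p := (hbnd p List.mem_cons_self).1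
      have hpm : p ≤ m := (hbnd p List.mem_cons_self).2
      obtain ⟨k, w, hres, heq, hnd, hw⟩ :=
        divOut_spec r.toNat p r acc hp2 hr (lt_pow_self_toNat p r hp2 hr)
      have hwdvd : w ∣ r := ⟨p ^ k, by rw [heq]; ring⟩
      obtain ⟨ext', rf, hrec, hrf1, hrfd, hprod', hext', hnone⟩ :=
        ih (acc ++ List.replicate k p) w hw
          (fun x hx => hbnd x (List.mem_cons_of_mem _ hx)) hpw.tail
          (by
            intro q' hq' hq'd hq'le
            have hmem' := hmem q' hq' (dvd_trans hq'd hwdvd) hq'le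
            rcases List.mem_cons.mp hmem' with hqe | hqe
            · exfalso; rw [hqe] at hq'd; exact hnd hq'd
            · exact hqe)
      refine ⟨List.replicate k p ++ ext', rf, ?_, hrf1, dvd_trans hrfd hwdvd, ?_, ?_, hnone⟩
      · rw [List.foldl_cons]
        rw [show divOut (acc, r).2.toNat p (acc, r)
            = (acc ++ List.replicate k p, w) from hres]
        rw [hrec, List.append_assoc]
      · rw [List.prod_append, List.prod_replicate]
        calc p ^ k * ext'.prod * rf = p ^ k * (ext'.prod * rf) := by ring
          _ = p ^ k * w := by rw [hprod']
          _ = r := heq.symm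
      · intro x hx
        rcases List.mem_append.mp hx with hx1 | hx2
        · obtain ⟨hk0, hxp⟩ := List.mem_replicate.mp hx1
          subst hxp
          have hpdvd : x ∣ r := by
            rw [heq]
            exact Dvd.dvd.mul_right (dvd_pow_self x hk0) w
          refine ⟨hp2, ?_⟩
          have hPne1 : x.toNat ≠ 1 := by omega
          have hq0p := Nat.minFac_prime hPne1
          have hq0le : x.toNat.minFac ≤ x.toNat := Nat.minFac_le (by omega)
          have hq0dp : (x.toNat.minFac : Int) ∣ x := by
            have := Int.natCast_dvd_natCast.mpr (Nat.minFac_dvd x.toNat)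
            rwa [Int.toNat_of_nonneg (by omega : (0:Int) ≤ x)] at this
          have hq0dr : (x.toNat.minFac : Int) ∣ r := dvd_trans hq0dp hpdvd
          have hq0lem : (x.toNat.minFac : Int) ≤ m := by omega
          have hmemq := hmem x.toNat.minFac hq0p hq0dr hq0lem
          rcases List.mem_cons.mp hmemq with he | he
          · have hEq : x.toNat.minFac = x.toNat := by omega
            rw [← hEq]
            exact hq0p
          · exfalso
            have := (List.pairwise_cons.mp hpw).1 _ he
            omega
        · exact hext' x hx2

-- ---- A's factorization produces a list of primes with product n ----
theorem pyFactorization_spec (n : Int) (h : 2 ≤ n) :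
    (∀ x ∈ pyFactorization n, 2 ≤ x ∧ x.toNat.Prime) ∧ (pyFactorization n).prod = n := by
  obtain ⟨ext, rf, hfold, hrf1, hrfd, hprod, hext, hnone⟩ :=
    factor_fold_spec ((n.toNat.sqrt : Nat) : Int)
      (prime_numbers_fast ((n.toNat.sqrt : Nat) : Int)) [] n (by omega)
      (primes_bounds _) (primes_sorted _)
      (fun q' hq' _ hqle => primes_complete _ q' hq' hqle)
  have hrfn : rf ≤ n := Int.le_of_dvd (by omega) hrfd
  simp only [pyFactorization]
  rw [hfold]
  simp only [List.nil_append]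
  by_cases hrf : rf = 1
  · subst hrf
    simp only [bne_self_eq_false, Bool.false_eq_true, if_false]
    refine ⟨fun x hx => hext x hx, ?_⟩
    have := hprod
    simpa using this
  · have h2rf : 2 ≤ rf := by omega
    have hb : (rf != 1) = true := by simp [hrf]
    rw [hb]
    simp only [if_true]
    constructor
    · intro x hx
      rcases List.mem_append.mp hx with hx1 | hx2
      · exact hext x hx1
      · have hxrf : x = rf := List.mem_singleton.mp hx2
        subst hxrf
        refine ⟨h2rf, ?_⟩
        by_contra hnp
        have hq := Nat.minFac_prime (show x.toNat ≠ 1 by omega)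
        have hsq := Nat.minFac_sq_le_self (show 0 < x.toNat by omega) hnp
        have hqsqrt : x.toNat.minFac ≤ n.toNat.sqrt := by
          apply Nat.le_sqrt.mpr
          have h1 : x.toNat.minFac * x.toNat.minFac ≤ x.toNat := by nlinarith [sq (x.toNat.minFac)]
          omega
        have hqdvd : (x.toNat.minFac : Int) ∣ x := by
          have := Int.natCast_dvd_natCast.mpr (Nat.minFac_dvd x.toNat)
          rwa [Int.toNat_of_nonneg (by omega : (0:Int) ≤ x)] at this
        exact hnone x.toNat.minFac hq hqdvd (by exact_mod_cast hqsqrt)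
    · rw [List.prod_append]
      simpa using hprod

-- ---- the two per-element strings agree ----
theorem per_elem_eq (i : Int) (h : 2 ≤ i) : aSubResult i = bSubResult i := by
  obtain ⟨hAprime, hAprod⟩ := pyFactorization_spec i h
  have hN2 : 2 ≤ i.toNat := by omega
  have hiN : ((i.toNat : Nat) : Int) = i := Int.toNat_of_nonneg (by omega)
  have hsort_eq : PySem.List.sorted (pyFactorization i) (fun x => x) false
      = (i.toNat.primeFactorsList).map (fun q : Nat => (q : Int)) := by
    apply pivot_eq_primeFactorsList
    · rw [List.Perm.prod_eq (PySem.List.sorted_perm (pyFactorization i) (fun x => x) false),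
        hAprod, hiN]
    · intro x hx
      rw [PySem.List.mem_sorted] at hx
      exact hAprime x hx
    · exact PySem.List.sorted_pairwise (pyFactorization i) (fun x => x)
  obtain ⟨Q, r, hB, hr1, hrp, hQp, hQm, hQprod⟩ := bOuter_spec (i.toNat + 2) 2 i ""
    (le_refl 2) (by omega) (by intro e he1 he2 _; omega) (by omega)
  have h1s : PySem.Int.toStr (1 : Int) = "1" := by decide
  have hAs : aSubResult i = finalizeRLE
      ((PySem.List.sorted (pyFactorization i) (fun x => x) false).foldl rleStep (-1, 0, "")) := rfl
  have hBs : bSubResult i =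
      if 1 < r then encodePairs Q ++ PySem.Int.toStr r ++ "1" else encodePairs Q := by
    unfold bSubResult
    rw [hB]
    simp [gt_iff_lt, String.empty_append]
  rw [hAs, hBs]
  by_cases hr2 : 1 < r
  · -- the residual is a prime factor: it joins the pair list with multiplicity 1
    rw [if_pos hr2]
    have hkeys : ∀ pc ∈ Q ++ [(r, (1 : Int))], 2 ≤ pc.1 ∧ 1 ≤ pc.2 := by
      intro pc hpc
      rcases List.mem_append.mp hpc with h1 | h2
      · obtain ⟨ha, _, hc, _⟩ := hQm pc h1
        exact ⟨by omega, hc⟩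
      · have : pc = (r, (1 : Int)) := List.mem_singleton.mp h2
        subst this
        exact ⟨by simp; omega, by simp⟩
    have hpw : (Q ++ [(r, (1 : Int))]).Pairwise (fun a b => a.1 < b.1) := by
      rw [List.pairwise_append]
      refine ⟨hQp, List.pairwise_singleton _ _, ?_⟩
      intro a ha b hb
      have : b = (r, (1 : Int)) := List.mem_singleton.mp hb
      subst this
      exact (hQm a ha).2.1 hr2
    have hflat : flattenPairs (Q ++ [(r, (1 : Int))]) = flattenPairs Q ++ [r] := by
      simp [flattenPairs]
    have hflat_eq : flattenPairs (Q ++ [(r, (1 : Int))])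
        = (i.toNat.primeFactorsList).map (fun q : Nat => (q : Int)) := by
      apply pivot_eq_primeFactorsList
      · rw [hflat, List.prod_append, List.prod_singleton, hiN]
        exact hQprod
      · intro x hx
        rw [hflat] at hx
        rcases List.mem_append.mp hx with h1 | h2
        · obtain ⟨pc, hpc, rfl⟩ := mem_flattenPairs h1
          obtain ⟨ha, _, _, hd'⟩ := hQm pc hpc
          exact ⟨by omega, hd'⟩
        · have : x = r := List.mem_singleton.mp h2
          subst this
          exact ⟨by omega, (hrp hr2).2⟩
      · exact flattenPairs_pairwise_le _ hpw
    rw [hsort_eq, ← hflat_eq]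
    rw [rle_entry _ (by simp) hkeys hpw]
    rw [encodePairs_append]
    simp [encodePairs, h1s, String.append_assoc, String.append_empty]
  · -- the residual is 1: the pair list is already complete
    have hr1' : r = 1 := by omega
    subst hr1'
    rw [if_neg hr2]
    have hprodQ : (flattenPairs Q).prod = i := by simpa using hQprod
    have hflat_eq : flattenPairs Q = (i.toNat.primeFactorsList).map (fun q : Nat => (q : Int)) := by
      apply pivot_eq_primeFactorsList
      · rw [hiN]; exact hprodQ
      · intro x hx
        obtain ⟨pc, hpc, rfl⟩ := mem_flattenPairs hx
        obtain ⟨ha, _, _, hd'⟩ := hQm pc hpc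
        exact ⟨by omega, hd'⟩
      · exact flattenPairs_pairwise_le _ hQp
    have hQne : Q ≠ [] := by
      intro hQnil
      subst hQnil
      have h0 : (i.toNat.primeFactorsList).map (fun q : Nat => (q : Int)) = [] := by
        rw [← hflat_eq]
        rfl
      have h1 : i.toNat.primeFactorsList = [] := List.map_eq_nil_iff.mp h0
      have := (Nat.primeFactorsList_eq_nil _).mp h1
      omega
    rw [hsort_eq, ← hflat_eq]
    exact rle_entry Q hQne
      (fun pc hpc => ⟨by have := (hQm pc hpc).1; omega, (hQm pc hpc).2.2.1⟩) hQp

theorem make_factor_sum_spec : Claim_equal_make_factor_sum := by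
  intro start end_ _ hpre
  unfold Spec_make_factor_sum make_factor_sum make_factor_sum_alt
  rcases hpre with hlt | hstart
  · rw [PySem.List.pyRange_one_eq_nil (show end_ + 1 ≤ start by omega)]
    simp only [List.foldl_nil]
  · apply PySem.List.foldl_congr_mem
    intro acc x hx
    have hx2 : 2 ≤ x := by
      have := (PySem.List.mem_pyRange_one.mp hx).1
      omega
    simp only [per_elem_eq x hx2]
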